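-- pv_equiv track=rewrite | github.com/pypi-data/pypi-mirror-260 | packages/ExplanationText/ExplanationText-0.2.2-py3-none-any.whl/explanation_text/explanation_generators/explanation_generator_v1/overview.py | generate_explanation_with_overview
-- ===== SOURCE A (Python) =====
-- def generate_explanation_with_overview(image, object_list):
--     """
--     Main method for explanation with overview
--     Current version:
--         'This image contains a <main_label>, a <main_label>, ... and a <main_label>'
--     """
--
--     if len(object_list) < 1:
--         # optional addition: This might be due to the image containing no objects that are known to the AI.
--         return "There were no objects detected in this image."
--
--     explanation = "This image contains"
--
--     # Case for one object
--     if len(object_list) == 1: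
--         explanation += " a " + object_list[0] + "."
--
--     # Case for multiple objects
--     else:
--         last_object = object_list[-1]
--         for object_label in object_list[0:-1]:
--             explanation += " a " + object_label + ","
--
--         # add last object and dot
--         explanation = explanation[:-1] + " and a " + last_object + "."
--
--     return explanation
-- ===== SOURCE B (Python) =====
-- def generate_explanation_with_overview(image, object_list):
--     if not object_list:
--         return "There were no objects detected in this image."
--     pieces = []
--     for i, label in enumerate(object_list):
--         if i == 0:
--             pieces.append(" a ")
--         elif i == len(object_list) - 1:
--             pieces.append(" and a ")
--         else:
--             pieces.append(", a ")
--         pieces.append(label)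
--     pieces.append(".")
--     return "This image contains" + "".join(pieces)
-- ===== Notes on version B (the rewrite author's own statement) =====
-- stated objective: alternative
-- what changed: Instead of A's accumulator loop that writes a trailing comma after every label and then trims it with a slice (plus a separate single-object branch), B makes one enumerate pass that picks the separator BEFORE each label from its position (first/last/middle), collects the pieces in a list and joins them once; no trimming and no single-object special case.
import Mathlib
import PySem

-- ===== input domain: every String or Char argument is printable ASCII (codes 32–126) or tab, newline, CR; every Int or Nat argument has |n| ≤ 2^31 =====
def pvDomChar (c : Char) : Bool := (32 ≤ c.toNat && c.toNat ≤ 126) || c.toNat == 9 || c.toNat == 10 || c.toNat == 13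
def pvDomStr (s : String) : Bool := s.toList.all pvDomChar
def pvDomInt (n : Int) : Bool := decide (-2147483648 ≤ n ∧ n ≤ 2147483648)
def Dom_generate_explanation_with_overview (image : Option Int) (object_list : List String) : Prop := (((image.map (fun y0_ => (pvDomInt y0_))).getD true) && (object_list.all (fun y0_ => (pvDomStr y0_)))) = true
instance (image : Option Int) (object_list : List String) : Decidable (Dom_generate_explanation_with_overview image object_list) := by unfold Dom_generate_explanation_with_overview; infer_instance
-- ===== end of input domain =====

-- B replaces A's accumulator loop with its trailing-comma slice trim (and its separate
-- single-object branch) by one enumerate pass that picks each label's LEADING separator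
-- from its position, collects pieces and joins once. Objective: alternative.
-- ===== PORT A =====
def generate_explanation_with_overview (image : Option Int) (object_list : List String) : String :=
  if object_list.length < 1 then "There were no objects detected in this image."
  else
    let explanation := "This image contains"
    if object_list.length == 1 then
      explanation ++ " a " ++ PySem.List.pyGetD object_list 0 "" ++ "."
    else
      let last_object := PySem.List.pyGetD object_list (-1) ""
      let explanation := (PySem.List.slice object_list (some 0) (some (-1))).foldl
        (fun acc object_label => acc ++ " a " ++ object_label ++ ",") explanation
      PySem.Str.slice explanation none (some (-1)) ++ " and a " ++ last_object ++ "."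

-- ===== PORT B =====
def generate_explanation_with_overview_alt (image : Option Int) (object_list : List String) : String :=
  if object_list.isEmpty then "There were no objects detected in this image."
  else
    let pieces := (PySem.List.enumerate object_list 0).foldl
      (fun acc p =>
        (acc ++ [if p.1 == 0 then " a "
                 else if p.1 == (object_list.length : Int) - 1 then " and a "
                 else ", a "]) ++ [p.2]) []
    "This image contains" ++ PySem.Str.join "" (pieces ++ ["."])

-- ===== PRECONDITION & SPEC =====
def Spec_generate_explanation_with_overview (image : Option Int) (object_list : List String) (out : String) : Prop := out = generate_explanation_with_overview_alt image object_list
instance (image : Option Int) (object_list : List String) (out : String) : Decidable (Spec_generate_explanation_with_overview image object_list out) := by unfold Spec_generate_explanation_with_overview; infer_instance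

-- ===== CLAIM =====
def Claim_equal_generate_explanation_with_overview : Prop := ∀ (image : Option Int) (object_list : List String), Dom_generate_explanation_with_overview image object_list → Spec_generate_explanation_with_overview image object_list (generate_explanation_with_overview image object_list)

-- ===== LEMMAS AND PROOFS =====
-- joining with the empty separator is flattening
lemma join_nil_eq_flatten (l : List (List Char)) :
    PySem.Chars.join [] l = l.flatten := by
  induction l with
  | nil => simp [PySem.Chars.join_nil]
  | cons x xs ih =>
    cases xs with
    | nil => simp [PySem.Chars.join_singleton]
    | cons y ys => rw [PySem.Chars.join_cons_cons, ih]; simp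

-- A's accumulator loop, at the character level
lemma foldl_toList (init : List String) (p : String) :
    (init.foldl (fun acc lbl => acc ++ " a " ++ lbl ++ ",") p).toList
      = p.toList ++ (init.map (fun o => ' ' :: 'a' :: ' ' :: (o.toList ++ [',']))).flatten := by
  induction init generalizing p with
  | nil => simp
  | cons x xs ih => simp [List.foldl_cons, ih]

-- trimming the trailing comma of A's chunks turns them into B's leading-separator chunks
lemma comma_shift : ∀ (ms : List (List Char)) (x : List Char),
    ((' ' :: 'a' :: ' ' :: (x ++ [',']))
        ++ (ms.map (fun o => ' ' :: 'a' :: ' ' :: (o ++ [',']))).flatten).dropLast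
      = (' ' :: 'a' :: ' ' :: x) ++ (ms.map (fun o => ',' :: ' ' :: 'a' :: ' ' :: o)).flatten := by
  intro ms
  induction ms with
  | nil =>
    intro x; simp
    rw [show ' ' :: (x ++ [',']) = (' ' :: x) ++ [','] by simp, List.dropLast_concat]
  | cons m ms ih =>
    intro x
    have h : (' ' :: 'a' :: ' ' :: (x ++ [',']))
          ++ ((m :: ms).map (fun o => ' ' :: 'a' :: ' ' :: (o ++ [',']))).flatten
        = (' ' :: 'a' :: ' ' :: ((x ++ ',' :: ' ' :: 'a' :: ' ' :: m) ++ [',']))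
          ++ (ms.map (fun o => ' ' :: 'a' :: ' ' :: (o ++ [',']))).flatten := by
      simp
    rw [h, ih (x ++ ',' :: ' ' :: 'a' :: ' ' :: m)]
    simp

-- flattening two-string chunks equals flattening their concatenations
lemma chunk2 (l : List String) :
    ((l.map (fun x => ',' :: ' ' :: 'a' :: ' ' :: x.toList)).dropLast).flatten
      = ((l.map (fun x => [[',', ' ', 'a', ' '], x.toList])).dropLast).flatten.flatten := by
  induction l with
  | nil => simp
  | cons a l ih =>
    cases l with
    | nil => simp
    | cons b l' =>
      simp only [List.map_cons, List.dropLast_cons₂, List.flatten_cons] at ih ⊢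
      simp [ih]

-- B's fold over the enumerated tail (indices ≥ 1): middle labels get ", a ", the last " and a "
lemma enumFold (n : Int) : ∀ (zt : List String) (z : String) (s : Int) (acc : List String),
    1 ≤ s → s + (z :: zt).length = n →
    (PySem.List.enumerate (z :: zt) s).foldl
      (fun acc p =>
        (acc ++ [if p.1 == 0 then " a "
                 else if p.1 == n - 1 then " and a "
                 else ", a "]) ++ [p.2]) acc
    = acc ++ ((z :: zt).dropLast.flatMap (fun o => [", a ", o]))
        ++ [" and a ", (z :: zt).getLast (by simp)] := by
  intro zt
  induction zt with
  | nil =>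
    intro z s acc hs hn
    have hn' : s + 1 = n := by simpa using hn
    have h0 : (s == 0) = false := by simp; omega
    have h1 : (s == n - 1) = true := by simp; omega
    simp only [PySem.List.enumerate_cons, PySem.List.enumerate_nil, List.foldl_cons,
      List.foldl_nil, h0, Bool.false_eq_true, if_false, h1, if_true]
    simp
  | cons w zt ih =>
    intro z s acc hs hn
    have hn' : s + 1 + ((w :: zt).length : Int) = n := by simp at hn ⊢; omega
    have h0 : (s == 0) = false := by simp; omega
    have h1 : (s == n - 1) = false := by simp at hn; simp; omega
    rw [PySem.List.enumerate_cons, List.foldl_cons]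
    simp only [h0, Bool.false_eq_true, if_false, h1]
    rw [ih w (s + 1) _ (by omega) hn']
    simp [List.getLast]

-- ===== VERDICT =====
theorem generate_explanation_with_overview_spec : Claim_equal_generate_explanation_with_overview := by
  intro image object_list _
  unfold Spec_generate_explanation_with_overview
  unfold generate_explanation_with_overview generate_explanation_with_overview_alt
  match object_list with
  | [] => simp
  | [x] =>
    simp only [List.length_cons, List.length_nil, List.isEmpty_cons]
    norm_num
    apply String.toList_inj.mp
    simp [PySem.Str.toList_join, join_nil_eq_flatten, String.toList_append]
  | x :: y :: rest =>
    have h2 : ¬ ((x :: y :: rest).length < 1) := by simp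
    have hb2 : (((x :: y :: rest).length == 1) = false) := by simp
    have hsl : PySem.List.slice (x :: y :: rest) (some 0) (some (-1)) = (x :: y :: rest).dropLast := by
      rw [PySem.List.slice_zero_start, PySem.List.slice_to_neg_one]
    simp only [List.isEmpty_cons, if_neg h2, hb2, Bool.false_eq_true, if_false]
    -- B side: evaluate the enumerate fold
    rw [PySem.List.enumerate_cons]
    simp only [List.foldl_cons, beq_self_eq_true, eq_self_iff_true, if_true, zero_add]
    rw [enumFold ((x :: y :: rest).length : Int) rest y 1 ([] ++ [" a "] ++ [x])
      (by omega) (by simp; omega)]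
    -- both sides at the character level
    apply String.toList_inj.mp
    rw [hsl]
    simp only [String.toList_append]
    rw [PySem.Str.slice_to_neg_one, foldl_toList,
      PySem.List.pyGetD_neg_one _ "" (by simp)]
    have hfl : (((x :: y :: rest).dropLast).map
        (fun o => ' ' :: 'a' :: ' ' :: (o.toList ++ [',']))).flatten ≠ [] := by
      cases rest <;> simp
    rw [List.dropLast_append_of_ne_nil hfl]
    rw [show ((x :: y :: rest).dropLast).map (fun o => ' ' :: 'a' :: ' ' :: (o.toList ++ [',']))
        = (' ' :: 'a' :: ' ' :: (x.toList ++ [',']))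
          :: (((y :: rest).dropLast.map String.toList).map
              (fun o => ' ' :: 'a' :: ' ' :: (o ++ [',']))) by
      simp [List.map_map]; rfl]
    rw [List.flatten_cons, comma_shift]
    simp [PySem.Str.toList_join, join_nil_eq_flatten, String.toList_append, List.map_map,
      List.flatMap_def, List.getLast, Function.comp_def]
    exact chunk2 (y :: rest)
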